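-- pv_equiv track=rewrite | github.com/sic-rus-ai/stepik-dl-nlp | dlnlputils/sentiment_utils.py | generate_markup
-- ===== SOURCE A (Python) =====
-- def generate_markup(tokens,tags):
--     mapper = lambda tag: tag[2:] if tag!='Other' else tag
--
--     tags  = [mapper(tag) for tag in tags]
--     text  = ' '.join(tokens)
--     spans = []
--
--     start,end,tag = 0,len(tokens[0]),tags[0]
--
--     for word, ttag in zip(tokens[1:], tags[1:]):
--
--         if tag == ttag:
--             end  += 1+len(word)
--
--         else:
--             span  = (start, end, tag)
--             spans.append(span)
--
--             start = 1+end
--             end  += 1+len(word)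
--             tag   = ttag
--
--     span  = (start, end, tag)
--     spans.append(span)
--
--     return text, spans
-- ===== SOURCE B (Python) =====
-- def generate_markup(tokens, tags):
--     # Run-at-a-time decomposition: scan forward to the end of each maximal
--     # run of equal (mapped) tags in the zipped token/tag stream, and emit the
--     # run's span directly, its width computed in closed form from the run's
--     # token lengths plus the inter-token separators.
--     mtags = [t if t == 'Other' else t[2:] for t in tags]
--     text = ' '.join(tokens)
--     pairs = list(zip(tokens, mtags))
--     n = len(pairs)
--     spans = []
--     pos = 0
--     i = 0
--     while i < n:
--         g = pairs[i][1]
--         j = i + 1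
--         while j < n and pairs[j][1] == g:
--             j += 1
--         run = pairs[i:j]
--         width = sum(len(w) for w, _ in run) + (j - i - 1)
--         spans.append((pos, pos + width, g))
--         pos += width + 1
--         i = j
--     return text, spans
-- ===== Notes on version B (the rewrite author's own statement) =====
-- stated objective: alternative
-- what changed: A merges one token at a time with a running start/end/tag state that is flushed on tag change; B instead peels one maximal run of equal mapped tags at a time from the zipped stream and emits each span directly with its width computed in closed form as sum of token lengths plus separators.
import Mathlib
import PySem

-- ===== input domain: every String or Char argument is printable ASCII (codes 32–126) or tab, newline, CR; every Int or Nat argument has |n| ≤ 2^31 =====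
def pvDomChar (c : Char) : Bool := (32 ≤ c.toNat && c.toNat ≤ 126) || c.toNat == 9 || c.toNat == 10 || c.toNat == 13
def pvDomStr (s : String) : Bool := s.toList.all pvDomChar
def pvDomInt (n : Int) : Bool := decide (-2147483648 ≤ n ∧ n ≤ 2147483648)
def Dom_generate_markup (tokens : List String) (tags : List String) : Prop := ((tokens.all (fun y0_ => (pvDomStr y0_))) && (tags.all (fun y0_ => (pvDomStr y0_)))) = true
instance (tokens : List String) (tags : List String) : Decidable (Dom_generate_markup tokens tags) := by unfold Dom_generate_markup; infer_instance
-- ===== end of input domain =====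

-- B replaces A's token-at-a-time running-state merge by a run-at-a-time scan emitting each span with a closed-form width (alternative decomposition, same cost); Pre_ excludes empty tokens/tags, where A raises IndexError.


-- ===== PORT A =====
-- the for-loop over zip(tokens[1:], tags[1:]) with state (start, end, tag, spans)
def gmLoopA : List (String × String) → Int × Int × String × List (Int × Int × String) → Int × Int × String × List (Int × Int × String)
  | [], st => st
  | (word, ttag) :: rest, (s, e, tg, sp) =>
    if tg = ttag then gmLoopA rest (s, e + 1 + PySem.Str.len word, tg, sp)
    else gmLoopA rest (e + 1, e + 1 + PySem.Str.len word, ttag, sp ++ [(s, e, tg)])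

def generate_markup (tokens : List String) (tags : List String) : String × (List (Int × Int × String)) :=
  let tags' := tags.map (fun tag => if tag ≠ "Other" then PySem.Str.slice tag (some 2) none else tag)
  let text := PySem.Str.join " " tokens
  match tokens, tags' with
  | t0 :: trest, g0 :: grest =>
    let (s, e, tg, sp) := gmLoopA (trest.zip grest) (0, PySem.Str.len t0, g0, [])
    (text, sp ++ [(s, e, tg)])
  | _, _ => ("", [])  -- Python raises IndexError here (tokens[0] / tags[0]); excluded by Pre_

-- ===== PORT B =====
-- inner while: advance j to the first position ≥ j whose tag differs from g
-- (fuel = a step bound making the loop structural; pairs.length suffices and the loop body is unchanged)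
def gmScanJ (pairs : List (String × String)) (g : String) : Nat → Nat → Nat
  | 0, j => j
  | fuel + 1, j =>
    if h : j < pairs.length then
      (if pairs[j].2 = g then gmScanJ pairs g fuel (j + 1) else j)
    else j

-- outer while: i is the start of the current run, j its exclusive end
def gmLoopB (pairs : List (String × String)) : Nat → Int → Nat → List (Int × Int × String)
  | 0, _, _ => []
  | fuel + 1, pos, i =>
    if h : i < pairs.length then
      let g := pairs[i].2
      let j := gmScanJ pairs g pairs.length (i + 1)
      let run := PySem.List.slice pairs (some (i : Int)) (some (j : Int))
      let width := (run.map (fun q => PySem.Str.len q.1)).sum + ((j : Int) - (i : Int) - 1)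
      (pos, pos + width, g) :: gmLoopB pairs fuel (pos + width + 1) j
    else []

def generate_markup_alt (tokens : List String) (tags : List String) : String × (List (Int × Int × String)) :=
  let mtags := tags.map (fun t => if t = "Other" then t else PySem.Str.slice t (some 2) none)
  let text := PySem.Str.join " " tokens
  let pairs := tokens.zip mtags
  (text, gmLoopB pairs pairs.length 0 0)

-- ===== PRECONDITION & SPEC =====
-- Pre_ excludes exactly the inputs on which A raises IndexError (tokens[0] / tags[0] on an empty list)
def Pre_generate_markup (tokens : List String) (tags : List String) : Prop := tokens ≠ [] ∧ tags ≠ []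
instance (tokens : List String) (tags : List String) : Decidable (Pre_generate_markup tokens tags) := by unfold Pre_generate_markup; infer_instance
def pvWitness_generate_markup : List String × List String := (["Tom", "lives", "in", "Kyiv"], ["B-PER", "Other", "Other", "B-LOC"])

def Spec_generate_markup (tokens : List String) (tags : List String) (out : String × (List (Int × Int × String))) : Prop := out = generate_markup_alt tokens tags
instance (tokens : List String) (tags : List String) (out : String × (List (Int × Int × String))) : Decidable (Spec_generate_markup tokens tags out) := by unfold Spec_generate_markup; infer_instance

-- ===== CLAIM (what is proved, stated in full; the proofs are below) =====
def Claim_equal_generate_markup : Prop := ∀ (tokens : List String) (tags : List String), Dom_generate_markup tokens tags → Pre_generate_markup tokens tags → Spec_generate_markup tokens tags (generate_markup tokens tags)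

-- ===== LEMMAS AND PROOFS =====

-- proof-side view of B: peel one maximal run from the front of the remaining pairs
def gmRunLen (g : String) : List (String × String) → Nat
  | [] => 0
  | (_, t) :: rest => if t = g then 1 + gmRunLen g rest else 0

theorem gmRunLen_le (g : String) : ∀ ps : List (String × String), gmRunLen g ps ≤ ps.length
  | [] => by simp [gmRunLen]
  | (w, t) :: rest => by
      simp only [gmRunLen, List.length_cons]
      split
      · have := gmRunLen_le g rest; omega
      · omega

def gmPeel (pos : Int) : List (String × String) → List (Int × Int × String)
  | [] => []
  | p :: rest =>
    let g := p.2
    let k := 1 + gmRunLen g rest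
    let width := (((p :: rest).take k).map (fun q => PySem.Str.len q.1)).sum + ((k : Int) - 1)
    (pos, pos + width, g) :: gmPeel (pos + width + 1) (rest.drop (k - 1))
  termination_by ps => ps.length
  decreasing_by
    simp only [List.length_drop, List.length_cons]
    omega

-- the index scan measures exactly the leading-run length of the remaining suffix
theorem gmScanJ_eq (pairs : List (String × String)) (g : String) : ∀ (fuel j : Nat), pairs.length ≤ fuel + j →
    gmScanJ pairs g fuel j = j + gmRunLen g (pairs.drop j) := by
  intro fuel
  induction fuel with
  | zero =>
    intro j hf
    rw [gmScanJ, List.drop_eq_nil_of_le (by omega)]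
    simp [gmRunLen]
  | succ n ih =>
    intro j hf
    rw [gmScanJ]
    split
    · rename_i h
      rw [List.drop_eq_getElem_cons h]
      rcases hp : pairs[j] with ⟨w, t⟩
      simp only [gmRunLen]
      by_cases ht : t = g
      · rw [if_pos ht, if_pos ht]
        rw [ih (j + 1) (by omega)]
        omega
      · rw [if_neg ht, if_neg ht]
        omega
    · rename_i h
      rw [List.drop_eq_nil_of_le (by omega)]
      simp [gmRunLen]

-- B's index loop is the peel of the remaining suffix
theorem gmLoopB_eq_gmPeel (pairs : List (String × String)) : ∀ (fuel i : Nat), pairs.length ≤ fuel + i →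
    ∀ pos : Int, gmLoopB pairs fuel pos i = gmPeel pos (pairs.drop i) := by
  intro fuel
  induction fuel with
  | zero =>
    intro i hf pos
    rw [gmLoopB, List.drop_eq_nil_of_le (by omega), gmPeel]
  | succ n ih =>
    intro i hf pos
    rw [gmLoopB]
    split
    · rename_i h
      rw [List.drop_eq_getElem_cons h]
      rcases hp : pairs[i] with ⟨w, g⟩
      set k1 := gmRunLen g (pairs.drop (i + 1)) with hk1
      have hk1le : k1 ≤ pairs.length - (i + 1) := by
        have := gmRunLen_le g (pairs.drop (i + 1))
        simpa using this
      have hj : gmScanJ pairs g pairs.length (i + 1) = i + 1 + k1 := by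
        rw [gmScanJ_eq pairs g pairs.length (i + 1) (by omega), hk1]
      have hslice : PySem.List.slice pairs (some (i : Int)) (some ((i + 1 + k1 : Nat) : Int))
          = (w, g) :: (pairs.drop (i + 1)).take k1 := by
        rw [PySem.List.slice_natCast]
        rw [show i + 1 + k1 - i = k1 + 1 from by omega]
        rw [List.drop_eq_getElem_cons h, hp, List.take_succ_cons]
      rw [gmPeel]
      simp only [hj, hslice]
      have hw : (((((w, g) :: (pairs.drop (i + 1)).take k1)).map (fun q : String × String => PySem.Str.len q.1)).sum) + (((i + 1 + k1 : Nat) : Int) - ((i : Nat) : Int) - 1)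
          = (((((w, g) :: pairs.drop (i + 1)).take (1 + k1))).map (fun q : String × String => PySem.Str.len q.1)).sum + (((1 + k1 : Nat) : Int) - 1) := by
        rw [show 1 + k1 = k1 + 1 from by omega, List.take_succ_cons]
        push_cast
        ring
      rw [hw]
      have hdropk : List.drop (1 + k1 - 1) (pairs.drop (i + 1)) = pairs.drop (i + 1 + k1) := by
        rw [List.drop_drop]
        congr 1
        omega
      rw [hdropk]
      rw [ih (i + 1 + k1) (by omega) _]
    · rw [List.drop_eq_nil_of_le (by omega), gmPeel]

-- A's fate, state-free: the spans A still produces from state (s, e, tg)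
def gmTail (s e : Int) (tg : String) : List (String × String) → List (Int × Int × String)
  | [] => [(s, e, tg)]
  | (word, ttag) :: rest =>
    if tg = ttag then gmTail s (e + 1 + PySem.Str.len word) tg rest
    else (s, e, tg) :: gmTail (e + 1) (e + 1 + PySem.Str.len word) ttag rest

def gmFinish (st : Int × Int × String × List (Int × Int × String)) : List (Int × Int × String) :=
  st.2.2.2 ++ [(st.1, st.2.1, st.2.2.1)]

theorem gmLoopA_eq_gmTail : ∀ (ps : List (String × String)) (s e : Int) (tg : String) (sp : List (Int × Int × String)),
    gmFinish (gmLoopA ps (s, e, tg, sp)) = sp ++ gmTail s e tg ps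
  | [], s, e, tg, sp => by simp [gmLoopA, gmFinish, gmTail]
  | (word, ttag) :: rest, s, e, tg, sp => by
      simp only [gmLoopA, gmTail]
      split
      · exact gmLoopA_eq_gmTail rest s (e + 1 + PySem.Str.len word) tg sp
      · rw [gmLoopA_eq_gmTail rest (e + 1) (e + 1 + PySem.Str.len word) ttag (sp ++ [(s, e, tg)])]
        simp

-- consuming a run of equal tags just extends e
theorem gmTail_run (g : String) : ∀ (run rest' : List (String × String)) (s e : Int),
    (∀ p ∈ run, p.2 = g) →
    gmTail s e g (run ++ rest') = gmTail s (e + ((run.map (fun q => 1 + PySem.Str.len q.1)).sum)) g rest'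
  | [], rest', s, e, _ => by simp
  | (w, t) :: run, rest', s, e, h => by
      have ht : t = g := h (w, t) (by simp)
      simp only [List.cons_append, gmTail, ht, if_true, List.map_cons, List.sum_cons]
      rw [gmTail_run g run rest' s (e + 1 + PySem.Str.len w) (fun p hp => h p (by simp [hp]))]
      congr 1
      ring

theorem gmRunLen_take (g : String) : ∀ ps : List (String × String), ∀ p ∈ ps.take (gmRunLen g ps), p.2 = g
  | [] => by simp [gmRunLen]
  | (w, t) :: rest => by
      by_cases ht : t = g
      · simp only [gmRunLen, if_pos ht]
        rw [show 1 + gmRunLen g rest = gmRunLen g rest + 1 from by omega]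
        simp only [List.take_succ_cons, List.mem_cons]
        rintro p (rfl | hp)
        · exact ht
        · exact gmRunLen_take g rest p hp
      · simp only [gmRunLen, if_neg ht, List.take_zero]
        intro p hp
        simp at hp

theorem gmRunLen_drop (g : String) : ∀ ps : List (String × String), ∀ w t rest', ps.drop (gmRunLen g ps) = (w, t) :: rest' → t ≠ g
  | [] => by simp [gmRunLen]
  | (w0, t0) :: rest => by
      by_cases ht : t0 = g
      · simp only [gmRunLen, if_pos ht]
        rw [show 1 + gmRunLen g rest = gmRunLen g rest + 1 from by omega]
        simp only [List.drop_succ_cons]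
        exact gmRunLen_drop g rest
      · simp only [gmRunLen, if_neg ht, List.drop_zero]
        intro w t rest' h
        cases h
        exact ht

-- main lemma: the run peel computes A's state-free fate
theorem gmPeel_eq_gmTail : ∀ (N : Nat) (rest : List (String × String)), rest.length ≤ N →
    ∀ (pos : Int) (w g : String),
    gmPeel pos ((w, g) :: rest) = gmTail pos (pos + PySem.Str.len w) g rest := by
  intro N
  induction N with
  | zero =>
    intro rest hN pos w g
    have : rest = [] := List.eq_nil_of_length_eq_zero (by omega)
    subst this
    simp [gmPeel, gmTail, gmRunLen]
  | succ n ih =>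
    intro rest hN pos w g
    rw [gmPeel]
    simp only []
    set k1 := gmRunLen g rest with hk1
    have hk1le : k1 ≤ rest.length := gmRunLen_le g rest
    have hwidth : (((((w, g) :: rest).take (1 + k1)).map (fun q => PySem.Str.len q.1)).sum) + ((((1 + k1 : Nat)) : Int) - 1)
        = PySem.Str.len w + ((rest.take k1).map (fun q => 1 + PySem.Str.len q.1)).sum := by
      push_cast
      rw [show 1 + k1 = k1 + 1 from by omega]
      rw [List.take_succ_cons]
      simp only [List.map_cons, List.sum_cons]
      rw [PySem.List.sum_map_add_int (rest.take k1) (fun _ => 1) (fun q => PySem.Str.len q.1)]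
      rw [PySem.List.sum_map_const_int]
      rw [List.length_take_of_le hk1le]
      ring
    conv_rhs => rw [(List.take_append_drop k1 rest).symm]
    rw [gmTail_run g (rest.take k1) (rest.drop k1) pos (pos + PySem.Str.len w) (gmRunLen_take g rest)]
    rcases hdrop : rest.drop k1 with _ | ⟨⟨w', g'⟩, rest''⟩
    · -- the run covers all remaining pairs
      have hk1eq : k1 = rest.length := by
        have h1 : (rest.drop k1).length = rest.length - k1 := List.length_drop
        rw [hdrop] at h1
        simp at h1
        omega
      simp only [gmTail]
      rw [show 1 + k1 - 1 = k1 from by omega, hdrop]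
      simp only [gmPeel]
      rw [hwidth]
      ring_nf
    · -- boundary: the next run starts at (w', g') with g' ≠ g
      have hne : g' ≠ g := gmRunLen_drop g rest w' g' rest'' hdrop
      simp only [gmTail, if_neg (Ne.symm hne)]
      rw [show 1 + k1 - 1 = k1 from by omega, hdrop]
      have hlt : rest''.length ≤ n := by
        have h1 : (rest.drop k1).length = rest.length - k1 := List.length_drop
        rw [hdrop] at h1
        simp at h1
        omega
      rw [ih rest'' hlt]
      rw [hwidth]
      ring_nf

theorem map_mapper_eq (tags : List String) :
    tags.map (fun tag => if tag ≠ "Other" then PySem.Str.slice tag (some 2) none else tag)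
      = tags.map (fun t => if t = "Other" then t else PySem.Str.slice t (some 2) none) := by
  apply List.map_congr_left
  intro t _
  by_cases h : t = "Other" <;> simp [h]

-- ===== VERDICT (by name: the statement is the Claim_ definition above) =====
theorem generate_markup_spec : Claim_equal_generate_markup := by
  unfold Claim_equal_generate_markup
  intro tokens tags _ hpre
  obtain ⟨ht, hg⟩ := hpre
  rcases tokens with _ | ⟨t0, trest⟩
  · exact absurd rfl ht
  rcases tags with _ | ⟨a0, arest⟩
  · exact absurd rfl hg
  unfold Spec_generate_markup generate_markup generate_markup_alt
  rw [map_mapper_eq]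
  simp only [List.map_cons, List.zip_cons_cons]
  have hA := gmLoopA_eq_gmTail (trest.zip (arest.map (fun t => if t = "Other" then t else PySem.Str.slice t (some 2) none)))
      0 (PySem.Str.len t0) (if a0 = "Other" then a0 else PySem.Str.slice a0 (some 2) none) []
  have hB0 := gmLoopB_eq_gmPeel ((t0, if a0 = "Other" then a0 else PySem.Str.slice a0 (some 2) none)
        :: trest.zip (arest.map (fun t => if t = "Other" then t else PySem.Str.slice t (some 2) none)))
      ((t0, if a0 = "Other" then a0 else PySem.Str.slice a0 (some 2) none)
        :: trest.zip (arest.map (fun t => if t = "Other" then t else PySem.Str.slice t (some 2) none))).length 0 (by omega) 0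
  simp only [List.drop_zero] at hB0
  have hB := gmPeel_eq_gmTail (trest.zip (arest.map (fun t => if t = "Other" then t else PySem.Str.slice t (some 2) none))).length
      _ le_rfl 0 t0 (if a0 = "Other" then a0 else PySem.Str.slice a0 (some 2) none)
  simp only [List.nil_append] at hA
  refine Prod.ext rfl ?_
  simp only []
  rw [hB0, hB]
  rcases hst : gmLoopA (trest.zip (arest.map (fun t => if t = "Other" then t else PySem.Str.slice t (some 2) none)))
      (0, PySem.Str.len t0, if a0 = "Other" then a0 else PySem.Str.slice a0 (some 2) none, []) with ⟨s, e, tg, sp⟩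
  rw [hst] at hA
  simp only [gmFinish] at hA
  simpa using hA
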